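-- pv_equiv track=rewrite | github.com/Dakuro/info_l1_dream | TP1/ex_02.py | list_result
-- ===== SOURCE A (Python) =====
-- result = "Valeurs{type} entre les bornes :\n"
--
-- wrong_char = "Caractère saisi incorrect"
--
-- exit = "Arrêt du programme..."
--
-- def list_result(inf, sup, type):
--     list_borne = list(range(inf + 1, sup))
--     if (inf + 1) % 2 == 0:
--         list_paire = [i for i in list_borne[::2]]
--         list_impaire = [i for i in list_borne[1::2]]
--     else:
--         list_paire = [i for i in list_borne[1::2]]
--         list_impaire = [i for i in list_borne[::2]]
--     switcher = {
--         0: exit,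
--         1: result.format(type="") + str(list_borne) + "\n",
--         2: result.format(type=" paires") + str(list_paire) + "\n",
--         3: result.format(type=" impaires") + str(list_impaire) + "\n"
--     }
--     return switcher.get(type, wrong_char)
-- ===== SOURCE B (Python) =====
-- result = "Valeurs{type} entre les bornes :\n"
--
-- wrong_char = "Caractère saisi incorrect"
--
-- exit = "Arrêt du programme..."
--
-- def list_result(inf, sup, type):
--     if type == 0:
--         return exit
--     if type == 1:
--         label = ""
--     elif type == 2:
--         label = " paires"
--     elif type == 3:
--         label = " impaires"
--     else:
--         return wrong_char
--     values = [i for i in range(inf + 1, sup) if type == 1 or i % 2 == type % 2]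
--     return result.format(type=label) + str(values) + "\n"
-- ===== Notes on version B (the rewrite author's own statement) =====
-- stated objective: simpler
-- what changed: Replaces the parity-of-start branch with its two stride-2 slices and the always-built switcher dict by an early-return dispatch on type that builds only the requested list, classifying each element by its own parity (i % 2 == type % 2) instead of slicing.
import Mathlib
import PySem

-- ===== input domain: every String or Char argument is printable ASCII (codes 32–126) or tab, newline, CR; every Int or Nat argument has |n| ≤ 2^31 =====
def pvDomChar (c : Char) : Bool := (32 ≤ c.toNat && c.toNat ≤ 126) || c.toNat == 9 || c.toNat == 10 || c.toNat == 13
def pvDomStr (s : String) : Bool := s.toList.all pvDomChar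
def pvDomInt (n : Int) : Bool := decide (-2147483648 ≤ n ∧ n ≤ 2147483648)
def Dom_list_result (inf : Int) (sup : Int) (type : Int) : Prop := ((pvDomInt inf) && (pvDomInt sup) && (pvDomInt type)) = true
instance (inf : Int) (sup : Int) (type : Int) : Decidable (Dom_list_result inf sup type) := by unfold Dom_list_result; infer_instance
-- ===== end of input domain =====

-- B replaces A's start-parity branch with stride-2 slices and always-built switcher dict
-- by an early-return dispatch that builds only the requested list, filtering each element
-- by its own parity (simpler decomposition, same cost).


-- shared module constants and built-ins (str(list) of ints, result.format(type=t))
def pvWrongChar : String := "Caractère saisi incorrect"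
def pvExit : String := "Arrêt du programme..."
-- result.format(type=t)
def pvResultFmt (t : String) : String := PySem.Str.join "" ["Valeurs", t, " entre les bornes :\n"]
-- Python's str() of a list of ints: "[a, b, c]"
def pyStrIntList (xs : List Int) : String :=
  PySem.Str.join "" ["[", PySem.Str.join ", " (xs.map PySem.Int.toStr), "]"]

-- ===== PORT A =====
def list_result (inf : Int) (sup : Int) (type : Int) : String :=
  let list_borne := PySem.List.pyRange (inf + 1) sup 1
  let pair :=
    if PySem.Int.mod (inf + 1) 2 = 0 then
      (((PySem.List.slice? list_borne none none 2).getD []).map (fun i => i),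
       ((PySem.List.slice? list_borne (some 1) none 2).getD []).map (fun i => i))
    else
      (((PySem.List.slice? list_borne (some 1) none 2).getD []).map (fun i => i),
       ((PySem.List.slice? list_borne none none 2).getD []).map (fun i => i))
  let switcher : PySem.Dict Int String :=
    PySem.Dict.ofList
      [(0, pvExit),
       (1, PySem.Str.join "" [pvResultFmt "", pyStrIntList list_borne, "\n"]),
       (2, PySem.Str.join "" [pvResultFmt " paires", pyStrIntList pair.1, "\n"]),
       (3, PySem.Str.join "" [pvResultFmt " impaires", pyStrIntList pair.2, "\n"])]
  switcher.getD type pvWrongChar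

-- ===== PORT B =====
-- shared tail of B's three non-trivial branches: build only the requested list and format it
def pvBodyB (inf : Int) (sup : Int) (type : Int) (label : String) : String :=
  let values := (PySem.List.pyRange (inf + 1) sup 1).filter
      (fun i => type == 1 || PySem.Int.mod i 2 == PySem.Int.mod type 2)
  PySem.Str.join "" [pvResultFmt label, pyStrIntList values, "\n"]

def list_result_alt (inf : Int) (sup : Int) (type : Int) : String :=
  if type = 0 then pvExit
  else if type = 1 then pvBodyB inf sup type ""
  else if type = 2 then pvBodyB inf sup type " paires"
  else if type = 3 then pvBodyB inf sup type " impaires"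
  else pvWrongChar

-- ===== PRECONDITION & SPEC =====
def Spec_list_result (inf : Int) (sup : Int) (type : Int) (out : String) : Prop := out = list_result_alt inf sup type
instance (inf : Int) (sup : Int) (type : Int) (out : String) : Decidable (Spec_list_result inf sup type out) := by unfold Spec_list_result; infer_instance

-- ===== CLAIM (what is proved, stated in full; the proofs are below) =====
def Claim_equal_list_result : Prop := ∀ (inf : Int) (sup : Int) (type : Int), Dom_list_result inf sup type → Spec_list_result inf sup type (list_result inf sup type)

-- ===== LEMMAS AND PROOFS =====

-- every other element of a list, starting with the first (what xs[::2] picks)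
def pvEveryOther {α : Type} : List α → List α
  | [] => []
  | [x] => [x]
  | x :: _ :: t => x :: pvEveryOther t

theorem pvEveryOther_cons {α : Type} (x : α) (l : List α) :
    pvEveryOther (x :: l) = x :: pvEveryOther l.tail := by
  cases l <;> rfl

theorem pvCoreEven {α : Type} : ∀ (xs : List α),
    (List.range ((xs.length + 1) / 2)).filterMap (fun k => xs[2 * k]?) = pvEveryOther xs
  | [] => by simp [pvEveryOther]
  | [x] => by simp [pvEveryOther]
  | x :: y :: t => by
    have ih := pvCoreEven t
    have hlen : ((x :: y :: t).length + 1) / 2 = (t.length + 1) / 2 + 1 := by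
      simp; omega
    rw [hlen, List.range_succ_eq_map, List.filterMap_cons, List.filterMap_map]
    have hf : ((fun k => (x :: y :: t)[2 * k]?) ∘ Nat.succ) = fun k => t[2 * k]? := by
      funext k
      show (x :: y :: t)[2 * (k + 1)]? = t[2 * k]?
      rw [show 2 * (k + 1) = 2 * k + 1 + 1 from by omega]
      simp
    rw [hf, ih]
    simp [pvEveryOther]

theorem pvSlice2 {α : Type} (xs : List α) :
    (PySem.List.slice? xs none none 2).getD [] = pvEveryOther xs := by
  have h2 : (2 : Int) ≠ 0 := by norm_num
  simp only [PySem.List.slice?, PySem.List.sliceIndices, if_neg h2]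
  norm_num
  have hcount : (if 0 < xs.length then (((xs.length : Int) + 2 - 1) / 2).toNat else 0)
      = ((xs.length + 1) / 2 : Nat) := by
    split_ifs with h <;> omega
  rw [hcount, ← pvCoreEven xs]
  apply List.filterMap_congr
  intro k _
  congr 1

theorem pvSlice2odd {α : Type} (xs : List α) :
    (PySem.List.slice? xs (some 1) none 2).getD [] = pvEveryOther xs.tail := by
  have h2 : (2 : Int) ≠ 0 := by norm_num
  cases xs with
  | nil => rfl
  | cons x t =>
    simp only [PySem.List.slice?, PySem.List.sliceIndices, if_neg h2]
    norm_num
    have hcount : (if 0 < t.length then (((t.length : Int) + 2 - 1) / 2).toNat else 0)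
        = ((t.length + 1) / 2 : Nat) := by
      split_ifs with h <;> omega
    rw [hcount, ← pvCoreEven t]
    apply List.filterMap_congr
    intro k _
    have hidx : ((1 : Int) + 2 * (k : Int)).toNat = 2 * k + 1 := by omega
    rw [hidx]
    simp

theorem pvParityPt (x u v : Int) (hx : x = 0 ∨ x = 1) (hu : u = 0 ∨ u = 1)
    (hv : v = 0 ∨ v = 1) (hne : v ≠ u) : (!(x == v)) = (x == u) := by
  rcases hx with hx | hx <;> rcases hu with hu | hu <;> rcases hv with hv | hv <;>
    subst hx <;> subst hu <;> subst hv <;> simp_all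

-- parity characterisation of A's stride-2 slices of a consecutive range
theorem pvEoRange : ∀ (n : Nat) (a b : Int), (b - a).toNat = n →
    pvEveryOther (PySem.List.pyRange a b 1)
      = (PySem.List.pyRange a b 1).filter (fun i => i % 2 == a % 2)
    ∧ pvEveryOther (PySem.List.pyRange a b 1).tail
      = (PySem.List.pyRange a b 1).filter (fun i => !(i % 2 == a % 2)) := by
  intro n
  induction n with
  | zero =>
    intro a b h
    rw [PySem.List.pyRange_one_eq_nil (by omega)]
    exact ⟨rfl, rfl⟩
  | succ m ih =>
    intro a b h
    have hab : a < b := by omega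
    obtain ⟨ih1, ih2⟩ := ih (a + 1) b (by omega)
    rw [PySem.List.pyRange_one_cons hab]
    constructor
    · rw [pvEveryOther_cons]
      rw [ih2, List.filter_cons]
      rw [if_pos (show (a % 2 == a % 2) = true from beq_self_eq_true _)]
      congr 1
      apply List.filter_congr
      intro i _
      exact pvParityPt _ _ _ (by omega) (by omega) (by omega) (by omega)
    · simp only [List.tail_cons]
      rw [List.filter_cons]
      rw [if_neg (show ¬ ((!(a % 2 == a % 2)) = true) from by
        rw [beq_self_eq_true]; decide)]
      rw [ih1]
      apply List.filter_congr
      intro i _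
      have := pvParityPt (i % 2) (a % 2) ((a + 1) % 2) (by omega) (by omega) (by omega) (by omega)
      rw [← this, Bool.not_not]

-- A's "paire" list is exactly the even elements of the range
theorem pvPaire (inf sup : Int) :
    (if 2 ∣ inf + 1 then
        (PySem.List.slice? (PySem.List.pyRange (inf + 1) sup 1) none none 2).getD []
      else
        (PySem.List.slice? (PySem.List.pyRange (inf + 1) sup 1) (some 1) none 2).getD [])
    = (PySem.List.pyRange (inf + 1) sup 1).filter (fun i => i % 2 == 0) := by
  obtain ⟨h1, h2⟩ := pvEoRange (sup - (inf + 1)).toNat (inf + 1) sup rfl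
  split_ifs with h
  · have ha : (inf + 1) % 2 = 0 := by omega
    rw [pvSlice2, h1, ha]
  · have ha : (inf + 1) % 2 = 1 := by omega
    rw [pvSlice2odd, h2, ha]
    apply List.filter_congr
    intro i _
    exact pvParityPt _ _ _ (by omega) (Or.inl rfl) (Or.inr rfl) (by norm_num)

-- A's "impaire" list is exactly the odd elements of the range
theorem pvImpaire (inf sup : Int) :
    (if 2 ∣ inf + 1 then
        (PySem.List.slice? (PySem.List.pyRange (inf + 1) sup 1) (some 1) none 2).getD []
      else
        (PySem.List.slice? (PySem.List.pyRange (inf + 1) sup 1) none none 2).getD [])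
    = (PySem.List.pyRange (inf + 1) sup 1).filter (fun i => i % 2 == 1) := by
  obtain ⟨h1, h2⟩ := pvEoRange (sup - (inf + 1)).toNat (inf + 1) sup rfl
  split_ifs with h
  · have ha : (inf + 1) % 2 = 0 := by omega
    rw [pvSlice2odd, h2, ha]
    apply List.filter_congr
    intro i _
    exact pvParityPt _ _ _ (by omega) (Or.inr rfl) (Or.inl rfl) (by norm_num)
  · have ha : (inf + 1) % 2 = 1 := by omega
    rw [pvSlice2, h1, ha]

-- ===== VERDICT (by name: the statement is the Claim_ definition above) =====
theorem list_result_spec : Claim_equal_list_result := by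
  intro inf sup type _
  unfold Spec_list_result list_result list_result_alt
  by_cases h0 : type = 0
  · subst h0
    rfl
  by_cases h1 : type = 1
  · subst h1
    simp [PySem.Dict.getD, PySem.Dict.get?, PySem.Dict.ofList, PySem.Dict.update,
      PySem.Dict.insert, PySem.Dict.empty, PySem.Dict.contains, pvBodyB]
  by_cases h2 : type = 2
  · subst h2
    simp [PySem.Dict.getD, PySem.Dict.get?, PySem.Dict.ofList, PySem.Dict.update,
      PySem.Dict.insert, PySem.Dict.empty, PySem.Dict.contains, pvBodyB]
    rw [apply_ite Prod.fst]
    dsimp only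
    rw [pvPaire inf sup]
  by_cases h3 : type = 3
  · subst h3
    simp [PySem.Dict.getD, PySem.Dict.get?, PySem.Dict.ofList, PySem.Dict.update,
      PySem.Dict.insert, PySem.Dict.empty, PySem.Dict.contains, pvBodyB]
    rw [apply_ite Prod.snd]
    dsimp only
    rw [pvImpaire inf sup]
  · simp [PySem.Dict.getD, PySem.Dict.get?, PySem.Dict.ofList, PySem.Dict.update,
      PySem.Dict.insert, PySem.Dict.empty, PySem.Dict.contains,
      beq_eq_false_iff_ne.mpr (Ne.symm h0), beq_eq_false_iff_ne.mpr (Ne.symm h1),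
      beq_eq_false_iff_ne.mpr (Ne.symm h2), beq_eq_false_iff_ne.mpr (Ne.symm h3), h0, h1, h2, h3]
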